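-- pv_equiv track=rewrite | github.com/jmgisele/AoC | 10/soln.py | calcAddTo
-- ===== SOURCE A (Python) =====
-- def calcAddTo(line, total=0):
--     if len(line) == 0:
--         return total
--     char = line[-1]
--     if char == '{':
--         total = (total * 5) + 3
--     if char == '<':
--         total = (total * 5) + 4
--     if char == '(':
--         total = (total * 5) + 1
--     if char == '[':
--         total = (total * 5) + 2
--     return calcAddTo(line[:-1], total)
-- ===== SOURCE B (Python) =====
-- def calcAddTo(line, total=0):
--     for char in reversed(line):
--         if char == '{':
--             total = total * 5 + 3
--         elif char == '<':
--             total = total * 5 + 4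
--         elif char == '(':
--             total = total * 5 + 1
--         elif char == '[':
--             total = total * 5 + 2
--     return total
-- ===== Notes on version B (the rewrite author's own statement) =====
-- stated objective: faster
-- what changed: Replaced the O(n^2) recursion that re-slices line[:-1] at every step with a single iterative reverse pass keeping a running accumulator, no slicing.
import Mathlib
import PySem

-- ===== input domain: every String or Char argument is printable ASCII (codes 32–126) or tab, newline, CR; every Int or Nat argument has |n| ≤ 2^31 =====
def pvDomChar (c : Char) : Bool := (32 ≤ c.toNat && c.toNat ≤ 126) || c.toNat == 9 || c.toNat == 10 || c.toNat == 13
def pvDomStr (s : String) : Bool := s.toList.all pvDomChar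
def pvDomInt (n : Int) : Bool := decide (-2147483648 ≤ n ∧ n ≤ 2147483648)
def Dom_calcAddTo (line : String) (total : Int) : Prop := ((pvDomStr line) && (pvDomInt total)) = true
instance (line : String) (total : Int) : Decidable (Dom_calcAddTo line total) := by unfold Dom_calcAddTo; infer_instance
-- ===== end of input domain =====

-- B replaces A's O(n^2) slicing recursion with one iterative reverse pass (asymptotically faster).


-- ===== PORT A =====
-- A recurses: takes line[-1], updates total through four successive ifs, recurses on line[:-1].
def calcAddToGoA (l : List Char) (total : Int) : Int :=
  if h : l = [] then total
  else
    let char := l.getLast h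
    let total := if char = '{' then total * 5 + 3 else total
    let total := if char = '<' then total * 5 + 4 else total
    let total := if char = '(' then total * 5 + 1 else total
    let total := if char = '[' then total * 5 + 2 else total
    calcAddToGoA l.dropLast total
termination_by l.length
decreasing_by
  have : l.length ≠ 0 := fun hn => h (List.eq_nil_of_length_eq_zero hn)
  simp [List.length_dropLast]; omega

def calcAddTo (line : String) (total : Int) : Int :=
  calcAddToGoA line.toList total

-- ===== PORT B =====
-- B: one fold over the reversed characters with an elif chain.
def calcAddToStep (total : Int) (char : Char) : Int :=
  if char = '{' then total * 5 + 3
  else if char = '<' then total * 5 + 4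
  else if char = '(' then total * 5 + 1
  else if char = '[' then total * 5 + 2
  else total

def calcAddTo_alt (line : String) (total : Int) : Int :=
  line.toList.reverse.foldl calcAddToStep total

-- ===== PRECONDITION & SPEC =====
def Spec_calcAddTo (line : String) (total : Int) (out : Int) : Prop := out = calcAddTo_alt line total
instance (line : String) (total : Int) (out : Int) : Decidable (Spec_calcAddTo line total out) := by unfold Spec_calcAddTo; infer_instance

-- ===== CLAIM (what is proved, stated in full; the proofs are below) =====
def Claim_equal_calcAddTo : Prop := ∀ (line : String) (total : Int), Dom_calcAddTo line total → Spec_calcAddTo line total (calcAddTo line total)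

-- ===== LEMMAS AND PROOFS =====

-- A's chain of independent ifs equals B's elif chain: at most one bracket test fires.
theorem calcAddTo_step_eq (c : Char) (t : Int) :
    (let t1 := if c = '{' then t * 5 + 3 else t
     let t2 := if c = '<' then t1 * 5 + 4 else t1
     let t3 := if c = '(' then t2 * 5 + 1 else t2
     if c = '[' then t3 * 5 + 2 else t3) = calcAddToStep t c := by
  unfold calcAddToStep
  split_ifs <;> simp_all

theorem calcAddToGoA_eq (l : List Char) (t : Int) :
    calcAddToGoA l t = l.reverse.foldl calcAddToStep t := by
  induction l using List.reverseRecOn generalizing t with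
  | nil => rw [calcAddToGoA]; simp
  | append_singleton xs x ih =>
    rw [calcAddToGoA]
    simp only [List.concat_ne_nil, dite_false, List.getLast_append,
      List.dropLast_concat, List.reverse_append, List.reverse_singleton,
      List.singleton_append, List.foldl_cons]
    rw [ih]
    congr 1
    exact calcAddTo_step_eq x t

-- ===== VERDICT (by name: the statement is the Claim_ definition above) =====
theorem calcAddTo_spec : Claim_equal_calcAddTo := by
  intro line total _
  unfold Spec_calcAddTo calcAddTo calcAddTo_alt
  exact calcAddToGoA_eq _ _
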